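-- pv_equiv track=rewrite | github.com/jdyer1/Slim | src/tests/testSlim.py | isCodeTableInStandardCoverOrder
-- ===== SOURCE A (Python) =====
-- def isCodeTableInStandardCoverOrder(ct):
--     lastFeatureId = None
--     lastSupport = None
--     lastCardinality = None
--     seenFeatureIds = set()
--     for (featureId, support, components) in ct:
--         cardinality = len(components)
--         if lastFeatureId is not None:
--             if featureId in seenFeatureIds:
--                 return False
--             if lastCardinality == cardinality:
--                 if lastSupport < support:
--                     return False
--                 if lastSupport == support:
--                     if lastFeatureId > featureId:
--                         return False
--
--         lastFeatureId = featureId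
--         lastSupport = support
--         lastCardinality = cardinality
--         seenFeatureIds.add(featureId)
--     return True
-- ===== SOURCE B (Python) =====
-- def isCodeTableInStandardCoverOrder(ct):
--     rows = list(ct)
--     # duplicate featureIds show up as equal neighbours once the ids are sorted
--     ids = sorted(r[0] for r in rows)
--     if any(a == b for a, b in zip(ids, ids[1:])):
--         return False
--     # split into maximal runs of equal cardinality; each run must equal its
--     # stable sort by (support descending, featureId ascending)
--     i, n = 0, len(rows)
--     while i < n:
--         j = i + 1
--         while j < n and len(rows[j][2]) == len(rows[i][2]):
--             j += 1
--         run = rows[i:j]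
--         if run != sorted(run, key=lambda q: (-q[1], q[0])):
--             return False
--         i = j
--     return True
-- ===== Notes on version B (the rewrite author's own statement) =====
-- stated objective: alternative
-- what changed: Replaces A's single interleaved stateful scan (last-row variables plus an incrementally grown seen-set) by a sorting-based algorithm: duplicate featureIds are detected as equal neighbours of sorted(ids), and the cover order is checked by splitting the table into maximal equal-cardinality runs and comparing each run with its stable sort by key (-support, featureId).
import Mathlib
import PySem

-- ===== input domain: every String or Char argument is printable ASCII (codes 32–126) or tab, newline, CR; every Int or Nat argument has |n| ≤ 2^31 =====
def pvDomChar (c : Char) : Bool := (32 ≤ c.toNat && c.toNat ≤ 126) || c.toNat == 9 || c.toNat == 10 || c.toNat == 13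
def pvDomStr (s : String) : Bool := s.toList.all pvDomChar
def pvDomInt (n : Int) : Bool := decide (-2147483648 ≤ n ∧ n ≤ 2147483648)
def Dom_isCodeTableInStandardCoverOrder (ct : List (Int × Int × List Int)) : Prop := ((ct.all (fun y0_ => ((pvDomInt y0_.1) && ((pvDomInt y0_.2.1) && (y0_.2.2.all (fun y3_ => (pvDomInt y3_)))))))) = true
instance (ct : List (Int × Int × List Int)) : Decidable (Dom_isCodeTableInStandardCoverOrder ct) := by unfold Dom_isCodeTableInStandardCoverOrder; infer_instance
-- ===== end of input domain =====

-- B replaces A's single interleaved stateful scan by a sorting-based algorithm: duplicate ids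
-- are found as equal neighbours of sorted(ids), and the cover order is checked by splitting the
-- table into maximal equal-cardinality runs and comparing each run with its stable sort by
-- (-support, featureId); objective: alternative (a different algorithm, not claimed faster).

-- ===== PORT A =====
-- A's loop, with the three last* variables (all None together, so one Option triple) and the seen set.
def pvALoop (last : Option (Int × Int × Int)) (seen : PySem.Set Int) :
    List (Int × Int × List Int) → Bool
  | [] => true
  | (featureId, support, components) :: rest =>
    let card : Int := components.length
    match last with
    | none => pvALoop (some (featureId, support, card)) (PySem.Set.add seen featureId) rest
    | some (lastF, lastS, lastC) =>
      if PySem.Set.contains seen featureId then false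
      else if lastC == card then
        if lastS < support then false
        else if lastS == support then
          if lastF > featureId then false
          else pvALoop (some (featureId, support, card)) (PySem.Set.add seen featureId) rest
        else pvALoop (some (featureId, support, card)) (PySem.Set.add seen featureId) rest
      else pvALoop (some (featureId, support, card)) (PySem.Set.add seen featureId) rest

def isCodeTableInStandardCoverOrder (ct : List (Int × Int × List Int)) : Bool :=
  pvALoop none PySem.Set.empty ct

-- ===== PORT B =====
-- Source B's inner while over indices i..j scans the maximal prefix of rows[i+1:] whose cardinality
-- equals that of rows[i]: run = rows[i:j] is r :: takeWhile, rows[j:] is dropWhile; the outer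
-- while loop is this structural recursion on the remaining suffix.
def pvRunsOrdered : List (Int × Int × List Int) → Bool
  | [] => true
  | r :: rest =>
    let run := r :: rest.takeWhile (fun q => q.2.2.length == r.2.2.length)
    if run == PySem.List.sorted2 run (fun q => -q.2.1) (fun q => q.1) false
    then pvRunsOrdered (rest.dropWhile (fun q => q.2.2.length == r.2.2.length))
    else false
termination_by l => l.length
decreasing_by
  exact Nat.lt_succ_of_le (List.length_dropWhile_le _ rest)

def isCodeTableInStandardCoverOrder_alt (ct : List (Int × Int × List Int)) : Bool :=
  let ids := PySem.List.sorted (ct.map (fun r => r.1)) (fun x => x) false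
  if (ids.zip (ids.drop 1)).any (fun q => q.1 == q.2) then false
  else pvRunsOrdered ct

-- ===== PRECONDITION & SPEC =====
def Spec_isCodeTableInStandardCoverOrder (ct : List (Int × Int × List Int)) (out : Bool) : Prop := out = isCodeTableInStandardCoverOrder_alt ct
instance (ct : List (Int × Int × List Int)) (out : Bool) : Decidable (Spec_isCodeTableInStandardCoverOrder ct out) := by unfold Spec_isCodeTableInStandardCoverOrder; infer_instance

-- ===== CLAIM (what is proved, stated in full; the proofs are below) =====
def Claim_equal_isCodeTableInStandardCoverOrder : Prop := ∀ (ct : List (Int × Int × List Int)), Dom_isCodeTableInStandardCoverOrder ct → Spec_isCodeTableInStandardCoverOrder ct (isCodeTableInStandardCoverOrder ct)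

-- ===== LEMMAS AND PROOFS =====

-- the order condition B's sort key imposes on an (ordered) pair of rows
def pvPP (a b : Int × Int × List Int) : Prop :=
  b.2.1 ≤ a.2.1 ∧ (a.2.1 = b.2.1 → a.1 ≤ b.1)

-- the condition A imposes on an adjacent pair of rows (vacuous unless cardinalities agree)
def pvQ (a b : Int × Int × List Int) : Prop :=
  b.2.2.length = a.2.2.length → pvPP a b

-- the comparator PySem.List.sorted2 run (fun q => -q.2.1) (fun q => q.1) false inserts with
def pvBefore (a b : Int × Int × List Int) : Bool :=
  decide ((-a.2.1 : Int) < -b.2.1) || (!decide ((-b.2.1 : Int) < -a.2.1) && decide (a.1 < b.1))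

-- adjacent-pair check of the chain starting at (lf, ls, lc)  (characterises A's order test)
def pvChain (lf ls lc : Int) : List (Int × Int × List Int) → Bool
  | [] => true
  | (f, s, c) :: rest =>
    if lc == (c.length : Int) && (decide (ls < s) || (ls == s && decide (lf > f))) then false
    else pvChain f s c.length rest

-- duplicate check relative to an already-seen set
def pvNoDup (seen : PySem.Set Int) : List (Int × Int × List Int) → Bool
  | [] => true
  | (f, _, _) :: rest => !(PySem.Set.contains seen f) && pvNoDup (PySem.Set.add seen f) rest

theorem pvALoop_decomp (rest : List (Int × Int × List Int)) :
    ∀ (lf ls lc : Int) (seen : PySem.Set Int),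
    pvALoop (some (lf, ls, lc)) seen rest = (pvChain lf ls lc rest && pvNoDup seen rest) := by
  induction rest with
  | nil => intro _ _ _ _; rfl
  | cons x rest ih =>
    intro lf ls lc seen
    obtain ⟨f, s, c⟩ := x
    by_cases hmem : f ∈ seen
    · simp [pvALoop, pvChain, pvNoDup, hmem]
    · by_cases hc : lc = (c.length : Int) <;>
      by_cases hlt : ls < s <;>
      by_cases heq : ls = s <;>
      by_cases hgt : f < lf <;>
      simp [pvALoop, pvChain, pvNoDup, hmem, hc, hlt, heq, hgt, ih]

theorem pvNoDup_eq (rest : List (Int × Int × List Int)) :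
    ∀ (seen : PySem.Set Int),
    pvNoDup seen rest =
      decide ((rest.map (fun r => r.1)).Nodup ∧ ∀ x ∈ rest.map (fun r => r.1), x ∉ seen) := by
  induction rest with
  | nil => intro _; simp [pvNoDup]
  | cons x rest ih =>
    intro seen
    obtain ⟨f, s, c⟩ := x
    by_cases hf : f ∈ seen
    · have hc : PySem.Set.contains seen f = true := (PySem.Set.contains_iff seen f).2 hf
      have hP : ¬ (((((f, s, c) :: rest)).map (fun r => r.1)).Nodup ∧
          ∀ x ∈ (((f, s, c) :: rest)).map (fun r => r.1), x ∉ seen) := by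
        rintro ⟨-, h2⟩
        exact h2 f (by simp) hf
      simp only [pvNoDup, hc, Bool.not_true, Bool.false_and]
      exact (decide_eq_false hP).symm
    · have hcf : PySem.Set.contains seen f = false := by
        cases hb : PySem.Set.contains seen f with
        | false => rfl
        | true => exact absurd ((PySem.Set.contains_iff seen f).1 hb) hf
      simp only [pvNoDup, hcf, Bool.not_false, Bool.true_and, ih]
      rw [decide_eq_decide]
      simp only [List.map_cons, List.nodup_cons]
      constructor
      · rintro ⟨h1, h2⟩
        refine ⟨⟨fun hmem => (h2 f hmem) ((PySem.Set.mem_add seen f f).2 (Or.inr rfl)), h1⟩, ?_⟩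
        intro y hy
        rcases List.mem_cons.1 hy with rfl | hy'
        · exact hf
        · exact fun hys => (h2 y hy') ((PySem.Set.mem_add seen f y).2 (Or.inl hys))
      · rintro ⟨⟨h0, h1⟩, h2⟩
        refine ⟨h1, fun y hy hyadd => ?_⟩
        rcases (PySem.Set.mem_add seen f y).1 hyadd with hys | rfl
        · exact h2 y (List.mem_cons_of_mem _ hy) hys
        · exact h0 hy

-- A's chain test holds iff pvQ chains through the whole table
theorem pvChain_true_iff (rest : List (Int × Int × List Int)) :
    ∀ (f s : Int) (c : List Int),
    pvChain f s (c.length : Int) rest = true ↔ List.IsChain pvQ ((f, s, c) :: rest) := by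
  induction rest with
  | nil => intro _ _ _; simp [pvChain]
  | cons y rest ih =>
    intro f s c
    obtain ⟨g, t, d⟩ := y
    rw [List.isChain_cons_cons]
    simp only [pvChain]
    rw [← ih g t d]
    by_cases hlen : c.length = d.length
    · have hlen' : (c.length : Int) = (d.length : Int) := by exact_mod_cast hlen
      by_cases hbad : (decide (s < t) || (s == t && decide (f > g))) = true
      · have hq : ¬ pvQ (f, s, c) (g, t, d) := by
          intro hQ
          have := hQ (by simpa using hlen.symm)
          simp only [pvPP] at this
          simp only [Bool.or_eq_true, decide_eq_true_eq, Bool.and_eq_true, beq_iff_eq] at hbad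
          omega
        simp [hlen', hbad, hq]
      · simp only [Bool.not_eq_true] at hbad
        have hq : pvQ (f, s, c) (g, t, d) := by
          intro _
          simp only [Bool.or_eq_false_iff, Bool.and_eq_false_iff, decide_eq_false_iff_not,
            beq_eq_false_iff_ne, ne_eq] at hbad
          simp only [pvPP]
          constructor
          · omega
          · intro hst
            rcases hbad.2 with h | h
            · exact absurd hst h
            · omega
        simp [hlen', hbad, hq]
    · have hlen' : (c.length : Int) ≠ (d.length : Int) := by exact_mod_cast hlen
      have hq : pvQ (f, s, c) (g, t, d) := fun h => absurd h (by simpa using fun h' => hlen h'.symm)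
      simp [hlen', hq]

-- ordering facts about the comparator
theorem pvBefore_false_iff (a b : Int × Int × List Int) :
    pvBefore b a = false ↔ pvPP a b := by
  simp only [pvBefore, pvPP, Bool.or_eq_false_iff, Bool.and_eq_false_iff,
    decide_eq_false_iff_not, not_lt, Bool.not_eq_false', decide_eq_true_eq]
  constructor
  · rintro ⟨h1, h2 | h2⟩ <;> constructor <;> intros <;> omega
  · rintro ⟨h1, h2⟩
    constructor
    · omega
    · by_cases he : a.2.1 = b.2.1
      · exact Or.inr (by have := h2 he; omega)
      · exact Or.inl (by omega)

theorem pvBefore_asymm (x y : Int × Int × List Int) (h : pvBefore x y = true) :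
    pvBefore y x = false := by
  simp only [pvBefore, Bool.or_eq_true, Bool.and_eq_true, decide_eq_true_eq,
    Bool.not_eq_true', decide_eq_false_iff_not, not_lt] at h
  simp only [pvBefore, Bool.or_eq_false_iff, Bool.and_eq_false_iff,
    decide_eq_false_iff_not, not_lt, Bool.not_eq_false', decide_eq_true_eq]
  rcases h with h | ⟨h1, h2⟩
  · exact ⟨by omega, Or.inl (by omega)⟩
  · exact ⟨by omega, Or.inr (by omega)⟩

theorem pvBefore_shift (x y z : Int × Int × List Int)
    (hxy : pvBefore x y = true) (hzy : pvBefore z y = false) : pvBefore z x = false := by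
  simp only [pvBefore, Bool.or_eq_true, Bool.and_eq_true, decide_eq_true_eq,
    Bool.not_eq_true', decide_eq_false_iff_not, not_lt] at hxy
  simp only [pvBefore, Bool.or_eq_false_iff, Bool.and_eq_false_iff,
    decide_eq_false_iff_not, not_lt, Bool.not_eq_false', decide_eq_true_eq] at hzy ⊢
  rcases hxy with h | ⟨h1, h2⟩ <;> rcases hzy with ⟨g1, g2 | g2⟩ <;>
    refine ⟨by omega, ?_⟩ <;> first
      | exact Or.inl (by omega)
      | (by_cases hc : x.2.1 < z.2.1
         · exact Or.inl (by omega)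
         · exact Or.inr (by omega))

-- insertion keeps the list sorted for pvBefore
theorem pvInsert_pairwise (x : Int × Int × List Int) (ys : List (Int × Int × List Int))
    (h : ys.Pairwise (fun a b => pvBefore b a = false)) :
    (PySem.List.insertBy pvBefore x ys).Pairwise (fun a b => pvBefore b a = false) := by
  induction ys with
  | nil => simp [PySem.List.insertBy]
  | cons y ys ih =>
    rw [List.pairwise_cons] at h
    by_cases hb : pvBefore x y = true
    · rw [show PySem.List.insertBy pvBefore x (y :: ys) = x :: y :: ys from by
        simp [PySem.List.insertBy, hb]]
      refine List.pairwise_cons.2 ⟨?_, List.pairwise_cons.2 ⟨h.1, h.2⟩⟩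
      intro z hz
      rcases List.mem_cons.1 hz with rfl | hz'
      · exact pvBefore_asymm x z hb
      · exact pvBefore_shift x y z hb (h.1 z hz')
    · rw [show PySem.List.insertBy pvBefore x (y :: ys) = y :: PySem.List.insertBy pvBefore x ys
          from by simp [PySem.List.insertBy, hb]]
      refine List.pairwise_cons.2 ⟨?_, ih h.2⟩
      intro z hz
      rcases (PySem.List.mem_insertBy pvBefore x z ys).1 hz with rfl | hz'
      · exact Bool.not_eq_true _ ▸ hb
      · exact h.1 z hz'

-- the insertion-sort fold always produces a pvBefore-sorted list
theorem pvSortF_pairwise (run : List (Int × Int × List Int)) :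
    (run.foldl (fun acc x => PySem.List.insertBy pvBefore x acc) []).Pairwise
      (fun a b => pvBefore b a = false) := by
  induction run using List.reverseRecOn with
  | nil => simp
  | append_singleton ys x ih =>
    rw [List.foldl_append]
    exact pvInsert_pairwise x _ ih

-- a pvBefore-sorted list is a fixed point of the fold
theorem pvSortF_eq_self (run : List (Int × Int × List Int))
    (h : run.Pairwise (fun a b => pvBefore b a = false)) :
    run.foldl (fun acc x => PySem.List.insertBy pvBefore x acc) [] = run := by
  induction run using List.reverseRecOn with
  | nil => rfl
  | append_singleton ys x ih =>
    rw [List.pairwise_append] at h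
    rw [List.foldl_append, List.foldl_cons, List.foldl_nil, ih h.1,
      PySem.List.insertBy_of_forall_not_before]
    intro y hy
    exact h.2.2 y hy x (List.mem_singleton_self x)

-- B's per-run test "run == sorted(run, key=(-sup, id))" holds iff the run is pvPP-pairwise
theorem pvRunSortedTest (run : List (Int × Int × List Int)) :
    (run == PySem.List.sorted2 run (fun q => -q.2.1) (fun q => q.1) false) = true ↔
      run.Pairwise pvPP := by
  have hdef : PySem.List.sorted2 run (fun q => -q.2.1) (fun q => q.1) false =
      run.foldl (fun acc x => PySem.List.insertBy pvBefore x acc) [] := rfl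
  rw [beq_iff_eq]
  constructor
  · intro he
    exact ((he ▸ (hdef ▸ pvSortF_pairwise run) :
        run.Pairwise (fun a b => pvBefore b a = false))).imp
      (fun hab => (pvBefore_false_iff _ _).1 hab)
  · intro h
    have hb : run.Pairwise (fun a b => pvBefore b a = false) :=
      h.imp (fun hab => (pvBefore_false_iff _ _).2 hab)
    rw [hdef, pvSortF_eq_self run hb]

-- within a constant-cardinality list, A's conditional pvQ chain and B's pvPP pairwise coincide
theorem pvChainQ_of_const_len (L : Nat) :
    ∀ (l : List (Int × Int × List Int)), (∀ x ∈ l, x.2.2.length = L) →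
      (List.IsChain pvQ l ↔ List.Pairwise pvPP l) := by
  intro l
  induction l with
  | nil => intro _; simp
  | cons a l ih =>
    intro hlen
    have hchain : List.IsChain pvQ (a :: l) ↔ List.IsChain pvPP (a :: l) := by
      clear ih
      induction l generalizing a with
      | nil => simp
      | cons b l ih2 =>
        rw [List.isChain_cons_cons, List.isChain_cons_cons,
          ih2 b (fun x hx => hlen x (List.mem_cons_of_mem a hx))]
        have hb : b.2.2.length = a.2.2.length := by
          rw [hlen a (List.mem_cons_self), hlen b (List.mem_cons_of_mem a List.mem_cons_self)]
        constructor
        · rintro ⟨h1, h2⟩; exact ⟨h1 hb, h2⟩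
        · rintro ⟨h1, h2⟩; exact ⟨fun _ => h1, h2⟩
    rw [hchain]
    haveI : Trans pvPP pvPP pvPP :=
      ⟨fun {a b c} hab hbc => by
        obtain ⟨h1, h2⟩ := hab
        obtain ⟨h3, h4⟩ := hbc
        refine ⟨by omega, fun h => ?_⟩
        have e1 : a.2.1 = b.2.1 := by omega
        have e2 : b.2.1 = c.2.1 := by omega
        exact le_trans (h2 e1) (h4 e2)⟩
    exact List.isChain_iff_pairwise

-- B's run loop holds iff pvQ chains through the whole table
theorem pvRunsOrdered_true_iff (l : List (Int × Int × List Int)) :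
    pvRunsOrdered l = true ↔ List.IsChain pvQ l := by
  induction hn : l.length using Nat.strong_induction_on generalizing l with
  | _ n ih =>
  cases l with
  | nil => simp [pvRunsOrdered]
  | cons r rest =>
    subst hn
    have hsplit : r :: rest =
        (r :: rest.takeWhile (fun q => q.2.2.length == r.2.2.length)) ++
          rest.dropWhile (fun q => q.2.2.length == r.2.2.length) := by
      rw [List.cons_append, List.takeWhile_append_dropWhile]
    have hconst : ∀ x ∈ r :: rest.takeWhile (fun q => q.2.2.length == r.2.2.length),
        x.2.2.length = r.2.2.length := by
      intro x hx
      rcases List.mem_cons.1 hx with rfl | hxm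
      · rfl
      · exact beq_iff_eq.1
          (List.mem_takeWhile_imp (p := fun q : Int × Int × List Int => q.2.2.length == r.2.2.length) hxm)
    have hchain : List.IsChain pvQ (r :: rest) ↔
        (List.IsChain pvQ (r :: rest.takeWhile (fun q => q.2.2.length == r.2.2.length)) ∧
         List.IsChain pvQ (rest.dropWhile (fun q => q.2.2.length == r.2.2.length))) := by
      conv_lhs => rw [hsplit]
      rw [List.isChain_append]
      constructor
      · rintro ⟨h1, h2, -⟩; exact ⟨h1, h2⟩
      · rintro ⟨h1, h2⟩
        refine ⟨h1, h2, ?_⟩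
        intro x hx y hy
        have hxlen : x.2.2.length = r.2.2.length := by
          rcases List.getLast?_eq_some_iff.1 hx with ⟨ys, hys⟩
          refine hconst x ?_
          rw [hys]; simp
        have hylen : y.2.2.length ≠ r.2.2.length := by
          have := List.head?_dropWhile_not (fun q => q.2.2.length == r.2.2.length) rest
          rw [hy] at this
          exact beq_eq_false_iff_ne.1 this
        intro hlen
        exact absurd (hlen.trans hxlen) hylen
    have hih := ih (rest.dropWhile (fun q => q.2.2.length == r.2.2.length)).length
      (Nat.lt_succ_of_le (List.length_dropWhile_le _ rest))
      (rest.dropWhile (fun q => q.2.2.length == r.2.2.length)) rfl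
    rw [hchain]
    simp only [pvRunsOrdered]
    by_cases hb : ((r :: rest.takeWhile (fun q => q.2.2.length == r.2.2.length)) ==
        PySem.List.sorted2 (r :: rest.takeWhile (fun q => q.2.2.length == r.2.2.length))
          (fun q => -q.2.1) (fun q => q.1) false) = true
    · rw [if_pos hb, hih]
      have hc1 : List.IsChain pvQ (r :: rest.takeWhile (fun q => q.2.2.length == r.2.2.length)) :=
        (pvChainQ_of_const_len r.2.2.length _ hconst).2 ((pvRunSortedTest _).1 hb)
      simp [hc1]
    · rw [if_neg hb]
      have hnp : ¬ List.IsChain pvQ (r :: rest.takeWhile (fun q => q.2.2.length == r.2.2.length)) := by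
        intro hp
        exact hb ((pvRunSortedTest _).2 ((pvChainQ_of_const_len r.2.2.length _ hconst).1 hp))
      simp [hnp]

-- adjacent equal neighbours in a list detect exactly the failure of the ≠-chain
theorem pvZipAny_false_iff (ys : List Int) :
    (((ys.zip (ys.drop 1)).any fun q => q.1 == q.2) = false) ↔
      List.IsChain (fun a b : Int => a ≠ b) ys := by
  induction ys with
  | nil => simp
  | cons y1 t ih =>
    cases t with
    | nil => simp
    | cons y2 t =>
      rw [show ((y1 :: y2 :: t).zip ((y1 :: y2 :: t).drop 1)) =
          (y1, y2) :: ((y2 :: t).zip ((y2 :: t).drop 1)) from by simp [List.zip]]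
      rw [List.any_cons, List.isChain_cons_cons, Bool.or_eq_false_iff, ← ih]
      simp

-- for a ≤-sorted Int list, no equal neighbours ⟺ no duplicates at all
theorem pvChainLt_of_ne : ∀ (ys : List Int), ys.Pairwise (· ≤ ·) →
    List.IsChain (fun a b : Int => a ≠ b) ys → List.IsChain (fun a b : Int => a < b) ys := by
  intro ys
  induction ys with
  | nil => intro _ _; simp
  | cons y1 t ih =>
    cases t with
    | nil => intro _ _; simp
    | cons y2 t =>
      intro hs hne
      rw [List.isChain_cons_cons] at hne ⊢
      rw [List.pairwise_cons] at hs
      exact ⟨lt_of_le_of_ne (hs.1 y2 List.mem_cons_self) hne.1, ih hs.2 hne.2⟩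

theorem pvChainNe_iff_nodup (ys : List Int) (hs : ys.Pairwise (· ≤ ·)) :
    List.IsChain (fun a b : Int => a ≠ b) ys ↔ ys.Nodup := by
  constructor
  · intro hne
    haveI : Trans (fun a b : Int => a < b) (fun a b : Int => a < b) (fun a b : Int => a < b) :=
      ⟨fun hab hbc => lt_trans hab hbc⟩
    exact (List.isChain_iff_pairwise.1 (pvChainLt_of_ne ys hs hne)).imp (fun h => ne_of_lt h)
  · intro hnd
    exact List.Pairwise.isChain hnd

-- B's duplicate test on sorted(ids) fails exactly when the id column has no duplicates
theorem pvDupTest (ids : List Int) :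
    ((((PySem.List.sorted ids (fun x => x) false).zip
        ((PySem.List.sorted ids (fun x => x) false).drop 1)).any fun q => q.1 == q.2) = false) ↔
      ids.Nodup := by
  have hpw : (PySem.List.sorted ids (fun x => x) false).Pairwise (· ≤ ·) :=
    PySem.List.sorted_pairwise ids (fun x => x)
  have hperm := PySem.List.sorted_perm ids (fun x => x) false
  rw [pvZipAny_false_iff, pvChainNe_iff_nodup _ hpw, hperm.nodup_iff]

-- A's value, restated: the pvQ chain and a duplicate-free id column
theorem pvA_char (ct : List (Int × Int × List Int)) :
    isCodeTableInStandardCoverOrder ct = true ↔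
      (List.IsChain pvQ ct ∧ (ct.map (fun r => r.1)).Nodup) := by
  cases ct with
  | nil => simp [isCodeTableInStandardCoverOrder, pvALoop]
  | cons x rest =>
    obtain ⟨f, s, c⟩ := x
    have hA : isCodeTableInStandardCoverOrder ((f, s, c) :: rest) =
        (pvChain f s (c.length : Int) rest && pvNoDup (PySem.Set.add PySem.Set.empty f) rest) := by
      simp only [isCodeTableInStandardCoverOrder, pvALoop]
      exact pvALoop_decomp rest f s (c.length : Int) _
    have hP : ((rest.map (fun r => r.1)).Nodup ∧
          ∀ x ∈ rest.map (fun r => r.1), x ∉ PySem.Set.add PySem.Set.empty f)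
        ↔ ((((f, s, c) :: rest)).map (fun r => r.1)).Nodup := by
      simp only [List.map_cons, List.nodup_cons]
      constructor
      · rintro ⟨h1, h2⟩
        exact ⟨fun hmem => (h2 f hmem) ((PySem.Set.mem_add _ f f).2 (Or.inr rfl)), h1⟩
      · rintro ⟨h0, h1⟩
        refine ⟨h1, fun y hy hmem => ?_⟩
        rcases (PySem.Set.mem_add _ f y).1 hmem with h | rfl
        · simp [PySem.Set.empty] at h
        · exact h0 hy
    rw [hA, Bool.and_eq_true, pvChain_true_iff, pvNoDup_eq, decide_eq_true_iff, hP]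

-- B's value, restated the same way
theorem pvB_char (ct : List (Int × Int × List Int)) :
    isCodeTableInStandardCoverOrder_alt ct = true ↔
      ((ct.map (fun r => r.1)).Nodup ∧ List.IsChain pvQ ct) := by
  simp only [isCodeTableInStandardCoverOrder_alt]
  by_cases hb : (((PySem.List.sorted (ct.map (fun r => r.1)) (fun x => x) false).zip
      ((PySem.List.sorted (ct.map (fun r => r.1)) (fun x => x) false).drop 1)).any
        fun q => q.1 == q.2) = true
  · rw [if_pos hb]
    have hnd : ¬ (ct.map (fun r => r.1)).Nodup := by
      intro hn
      rw [← pvDupTest] at hn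
      rw [hn] at hb
      exact Bool.false_ne_true hb
    simp [hnd]
  · rw [if_neg hb]
    have hnd : (ct.map (fun r => r.1)).Nodup := (pvDupTest _).1 (Bool.not_eq_true _ ▸ hb)
    rw [pvRunsOrdered_true_iff]
    simp [hnd]

-- ===== VERDICT (by name: the statement is the Claim_ definition above) =====
theorem isCodeTableInStandardCoverOrder_spec : Claim_equal_isCodeTableInStandardCoverOrder := by
  intro ct _
  show isCodeTableInStandardCoverOrder ct = isCodeTableInStandardCoverOrder_alt ct
  rw [Bool.eq_iff_iff, pvA_char, pvB_char]
  tauto
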